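-- pv_equiv track=rewrite | github.com/yashjaiswal1/CTCI-DSA | ds/competitions/accenture-round2.py | solve
-- ===== SOURCE A (Python) =====
-- def sensor1(L, R):
--     result = [None, 1]
--     repetitions = 1
--     for i in range(1, R+1):
--         repetitions = 2**(i - 1)
--         while(repetitions):
--             if len(result) == R+1:
--                 break
--             result.append(2**i)
--             repetitions -= 1
--     return result[L:R+1]
--
-- def sensor2(L, R, X):
--     result = []
--     for i in range(1, R+1):
--         for j in range(X):
--             if len(result) == R:
--                 break
--             result.append(X*i)
--     return result[L-1:]
--
-- def solve(L, R, X):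
--     arr1 = sensor1(L, R)
--     arr2 = sensor2(L, R, X)
--     sensor1_early_count = 0
--     sensor2_early_count = 0
--     for i in range(R - L + 1):
--         if arr1[i] < arr2[i]:
--             sensor1_early_count += 1
--         elif arr2[i] < arr1[i]:
--             sensor2_early_count += 1
--
--     if sensor1_early_count > sensor2_early_count:
--         return 1
--     elif sensor2_early_count > sensor1_early_count:
--         return 2
--     else:
--         return 0
-- ===== SOURCE B (Python) =====
-- def solve(L, R, X):
--     # closed form per window index: sensor1 value at position k is 2**(k-1).bit_length(),
--     # sensor2 value at position k is X * ceil(k / X); single pass over L..R only.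
--     c1 = 0
--     c2 = 0
--     for k in range(L, R + 1):
--         v1 = 2 ** (k - 1).bit_length()
--         v2 = X * ((k + X - 1) // X)
--         if v1 < v2:
--             c1 += 1
--         elif v2 < v1:
--             c2 += 1
--     if c1 > c2:
--         return 1
--     elif c2 > c1:
--         return 2
--     else:
--         return 0
-- ===== Notes on version B (the rewrite author's own statement) =====
-- stated objective: faster
-- what changed: B replaces A's materialisation of both full sensor sequences 1..R (nested loops with break-capped repetition blocks) by a closed-form value per index (2**bit_length for sensor1, X*ceil(k/X) for sensor2) computed only over the window L..R in one pass.
import Mathlib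
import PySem

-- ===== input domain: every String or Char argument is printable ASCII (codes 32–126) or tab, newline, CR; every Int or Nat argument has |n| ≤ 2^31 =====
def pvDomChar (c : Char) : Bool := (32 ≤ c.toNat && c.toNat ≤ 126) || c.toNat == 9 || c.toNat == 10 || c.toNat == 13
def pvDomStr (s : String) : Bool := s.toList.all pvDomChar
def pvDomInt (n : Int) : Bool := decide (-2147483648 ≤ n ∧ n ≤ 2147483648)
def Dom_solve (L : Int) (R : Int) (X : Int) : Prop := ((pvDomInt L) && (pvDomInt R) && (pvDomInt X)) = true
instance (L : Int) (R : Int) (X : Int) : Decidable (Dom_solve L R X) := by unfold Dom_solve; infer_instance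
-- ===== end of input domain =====

-- B computes each sensor value by a closed form over the window L..R only, instead of
-- materialising both full sensor sequences 1..R as A does (objective: faster).

-- ===== PORT A =====
-- inner 'while(repetitions):' of sensor1 (fuel = repetitions; break when len == R+1)
def s1inner (R : Int) (i : Int) : Nat → List (Option Int) → List (Option Int)
  | 0, result => result
  | reps + 1, result =>
      if (result.length : Int) = R + 1 then result
      else s1inner R i reps (result ++ [some ((2 : Int) ^ i.toNat)])

def sensor1 (L : Int) (R : Int) : List (Option Int) :=
  let result := (PySem.List.pyRange 1 (R + 1) 1).foldl
    (fun res i => s1inner R i (2 ^ (i - 1).toNat) res) [none, some 1]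
  PySem.List.slice result (some L) (some (R + 1))

-- inner 'for j in range(X):' of sensor2 (fuel = max(X,0); break when len == R)
def s2inner (R : Int) (X : Int) (i : Int) : Nat → List Int → List Int
  | 0, result => result
  | fuel + 1, result =>
      if (result.length : Int) = R then result
      else s2inner R X i fuel (result ++ [X * i])

def sensor2 (L : Int) (R : Int) (X : Int) : List Int :=
  let result := (PySem.List.pyRange 1 (R + 1) 1).foldl
    (fun res i => s2inner R X i X.toNat res) []
  PySem.List.slice result (some (L - 1)) none

-- ===== PORT A (continued: solve) =====
def solve (L : Int) (R : Int) (X : Int) : Int :=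
  let arr1 := sensor1 L R
  let arr2 := sensor2 L R X
  let counts := (PySem.List.pyRange 0 (R - L + 1) 1).foldl
    (fun (c : Int × Int) i =>
      match PySem.List.pyGet? arr1 i, PySem.List.pyGet? arr2 i with
      | some (some a), some b =>
          if a < b then (c.1 + 1, c.2) else if b < a then (c.1, c.2 + 1) else c
      | _, _ => c  -- IndexError / 'None < int': Python raises here; unreachable under Pre_solve
    ) (0, 0)
  if counts.1 > counts.2 then 1 else if counts.2 > counts.1 then 2 else 0

-- ===== PORT B =====
def solve_alt (L : Int) (R : Int) (X : Int) : Int :=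
  let counts := (PySem.List.pyRange L (R + 1) 1).foldl
    (fun (c : Int × Int) k =>
      let v1 : Int := 2 ^ PySem.Int.bitLength (k - 1)
      let v2 : Int := X * PySem.Int.floordiv (k + X - 1) X
      if v1 < v2 then (c.1 + 1, c.2) else if v2 < v1 then (c.1, c.2 + 1) else c) (0, 0)
  if counts.1 > counts.2 then 1 else if counts.2 > counts.1 then 2 else 0

-- ===== PRECONDITION & SPEC =====
-- Pre_ excludes exactly the inputs on which A raises: with a non-empty window (L ≤ R),
-- L ≤ 0 makes A compare None with an int (TypeError) or index past the slice, and
-- X ≤ 0 leaves sensor2 empty (IndexError). A returns normally on every other input.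
def Pre_solve (L : Int) (R : Int) (X : Int) : Prop := L ≤ R → (1 ≤ L ∧ 1 ≤ X)
instance (L : Int) (R : Int) (X : Int) : Decidable (Pre_solve L R X) := by unfold Pre_solve; infer_instance

def pvWitness_solve : Int × Int × Int := (2, 7, 3)

def Spec_solve (L : Int) (R : Int) (X : Int) (out : Int) : Prop := out = solve_alt L R X
instance (L : Int) (R : Int) (X : Int) (out : Int) : Decidable (Spec_solve L R X out) := by unfold Spec_solve; infer_instance

-- ===== CLAIM (what is proved, stated in full; the proofs are below) =====
def Claim_equal_solve : Prop := ∀ (L : Int) (R : Int) (X : Int), Dom_solve L R X → Pre_solve L R X → Spec_solve L R X (solve L R X)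

-- ===== LEMMAS AND PROOFS =====

-- value of the full sensor1 list at 0-based index j+1 (index 0 holds Python's None)
def val1 (j : Nat) : Option Int := some ((2 : Int) ^ PySem.Int.bitLength (j : Int))
def F1 (n : Nat) : List (Option Int) := none :: (List.range n).map val1
-- value of the full sensor2 list at 0-based index j (position k = j+1): X * ceil(k/X)
def val2 (X : Int) (j : Nat) : Int := X * PySem.Int.floordiv ((j : Int) + X) X
def F2 (X : Int) (n : Nat) : List Int := (List.range n).map (val2 X)


theorem bitLength_unique (j b : Nat) (h1 : 2 ^ (b - 1) ≤ j) (h2 : j < 2 ^ b) (hb : 1 ≤ b) :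
    PySem.Int.bitLength (j : Int) = b := by
  have hj0 : j ≠ 0 := by have : 1 ≤ 2 ^ (b-1) := Nat.one_le_two_pow; omega
  have hc1 : j < 2 ^ PySem.Int.bitLength (j : Int) := by
    have := PySem.Int.lt_two_pow_bitLength (j : Int)
    simpa using this
  have hc2 : 2 ^ (PySem.Int.bitLength (j : Int) - 1) ≤ j := by
    have := PySem.Int.two_pow_bitLength_le (j : Int) (by exact_mod_cast hj0)
    simpa using this
  set c := PySem.Int.bitLength (j : Int) with hc
  rcases lt_trichotomy c b with h | h | h
  · exfalso
    have : (2:Nat) ^ c ≤ 2 ^ (b-1) := Nat.pow_le_pow_right (by norm_num) (by omega)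
    omega
  · exact h
  · exfalso
    have : (2:Nat) ^ b ≤ 2 ^ (c-1) := Nat.pow_le_pow_right (by norm_num) (by omega)
    omega

theorem map_range_append {α : Type} (f : Nat → α) (n c : Nat) (v : α)
    (h : ∀ j, n ≤ j → j < n + c → f j = v) :
    (List.range (n + c)).map f = (List.range n).map f ++ List.replicate c v := by
  rw [List.range_add, List.map_append, List.map_map]
  congr 1
  have : ∀ b ∈ (List.range c).map (f ∘ (n + ·)), b = v := by
    intro b hb
    simp only [List.mem_map, List.mem_range, Function.comp] at hb
    obtain ⟨t, ht, rfl⟩ := hb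
    exact h (n + t) (by omega) (by omega)
  have hlen : ((List.range c).map (f ∘ (n + ·))).length = c := by simp
  have h2 := List.eq_replicate_of_mem this
  rwa [hlen] at h2

theorem s1inner_eq (R : Int) (i : Int) (cap : Nat) (hcap : R + 1 = (cap : Int)) :
    ∀ (reps : Nat) (res : List (Option Int)), res.length ≤ cap →
    s1inner R i reps res = res ++ List.replicate (min reps (cap - res.length)) (some ((2 : Int) ^ i.toNat)) := by
  intro reps
  induction reps with
  | zero => intro res _; simp [s1inner]
  | succ n ih =>
    intro res hlen
    rw [s1inner]
    by_cases hful : res.length = cap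
    · rw [if_pos (by rw [hcap, hful])]
      simp [hful]
    · rw [if_neg (by rw [hcap]; exact_mod_cast fun h => hful (by exact_mod_cast h))]
      rw [ih _ (by simp; omega)]
      have hmin : min (n + 1) (cap - res.length) = min n (cap - (res.length + 1)) + 1 := by omega
      simp only [List.length_append, List.length_cons, List.length_nil, Nat.zero_add, hmin,
        List.append_assoc, List.replicate_succ, List.singleton_append]

theorem s2inner_eq (R : Int) (X : Int) (i : Int) (cap : Nat) (hcap : R = (cap : Int)) :
    ∀ (fuel : Nat) (res : List Int), res.length ≤ cap →
    s2inner R X i fuel res = res ++ List.replicate (min fuel (cap - res.length)) (X * i) := by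
  intro fuel
  induction fuel with
  | zero => intro res _; simp [s2inner]
  | succ n ih =>
    intro res hlen
    rw [s2inner]
    by_cases hful : res.length = cap
    · rw [if_pos (by rw [hcap, hful])]
      simp [hful]
    · rw [if_neg (by rw [hcap]; exact_mod_cast fun h => hful (by exact_mod_cast h))]
      rw [ih _ (by simp; omega)]
      have hmin : min (n + 1) (cap - res.length) = min n (cap - (res.length + 1)) + 1 := by omega
      simp only [List.length_append, List.length_cons, List.length_nil, Nat.zero_add, hmin,
        List.append_assoc, List.replicate_succ, List.singleton_append]

theorem val2_block (X : Int) (hX : 1 ≤ X) (m j : Nat)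
    (hj1 : X.toNat * m ≤ j) (hj2 : j < X.toNat * m + X.toNat) :
    val2 X j = X * ((m : Int) + 1) := by
  have hXn : X = (X.toNat : Int) := by omega
  rw [val2]
  congr 1
  rw [PySem.Int.floordiv_eq_iff_of_pos (by omega)]
  constructor
  · have : ((X.toNat * m : Nat) : Int) ≤ (j : Int) := by exact_mod_cast hj1
    push_cast at this ⊢
    nlinarith [this, hXn]
  · have : (j : Int) < ((X.toNat * m + X.toNat : Nat) : Int) := by exact_mod_cast hj2
    push_cast at this ⊢
    nlinarith [this, hXn]

theorem sensor2_loop (R : Int) (X : Int) (hR : 1 ≤ R) (hX : 1 ≤ X) (m : Nat) :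
    (PySem.List.pyRange 1 ((m : Int) + 1) 1).foldl
      (fun res i => s2inner R X i X.toNat res) []
    = F2 X (min (X.toNat * m) R.toNat) := by
  have hRn : R = (R.toNat : Int) := by omega
  induction m with
  | zero =>
    rw [PySem.List.pyRange_one_eq_nil (by norm_num)]
    simp [F2]
  | succ m ih =>
    have hstep : ((m + 1 : Nat) : Int) + 1 = ((m : Int) + 1) + 1 := by push_cast; ring
    rw [hstep, PySem.List.pyRange_one_succ_right (by omega), List.foldl_append, ih]
    simp only [List.foldl_cons, List.foldl_nil]
    rw [s2inner_eq R X _ R.toNat (by omega) _ _ (by simp only [F2, List.length_map, List.length_range]; omega)]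
    by_cases hc : R.toNat ≤ X.toNat * m
    · have h1 : min (X.toNat * m) R.toNat = R.toNat := by omega
      have h2 : min (X.toNat * (m+1)) R.toNat = R.toNat := by
        have : X.toNat * m ≤ X.toNat * (m+1) := by nlinarith
        omega
      rw [h1, h2]
      simp [F2]
    · have h1 : min (X.toNat * m) R.toNat = X.toNat * m := by omega
      rw [h1]
      set c := min X.toNat (R.toNat - (F2 X (X.toNat * m)).length) with hcdef
      have hlen : (F2 X (X.toNat * m)).length = X.toNat * m := by simp [F2]
      have hc2 : c = min X.toNat (R.toNat - X.toNat * m) := by rw [hcdef, hlen]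
      have h2 : min (X.toNat * (m+1)) R.toNat = X.toNat * m + c := by
        have : X.toNat * (m+1) = X.toNat * m + X.toNat := by ring
        omega
      have hval : X * ((m : Int) + 1) = X * (((m+1:Nat) : Int)) := by push_cast; ring
      rw [h2]
      show F2 X (X.toNat * m) ++ List.replicate c (X * ((m : Int) + 1)) = _
      rw [hval]
      rw [F2, F2, map_range_append (val2 X) (X.toNat * m) c (X * (((m+1:Nat)) : Int))
        (by
          intro j hj1 hj2
          rw [val2_block X hX m j hj1 (by omega), hval])]

theorem sensor1_loop (R : Int) (hR : 1 ≤ R) (m : Nat) :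
    (PySem.List.pyRange 1 ((m : Int) + 1) 1).foldl
      (fun res i => s1inner R i (2 ^ (i - 1).toNat) res) [none, some 1]
    = F1 (min (2 ^ m) R.toNat) := by
  have hRn : R = (R.toNat : Int) := by omega
  induction m with
  | zero =>
    rw [PySem.List.pyRange_one_eq_nil (by norm_num)]
    have h1 : min (2 ^ 0) R.toNat = 1 := by simp; omega
    rw [h1]
    rfl
  | succ m ih =>
    have hstep : ((m + 1 : Nat) : Int) + 1 = ((m : Int) + 1) + 1 := by push_cast; ring
    rw [hstep, PySem.List.pyRange_one_succ_right (by omega), List.foldl_append, ih]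
    simp only [List.foldl_cons, List.foldl_nil]
    have hi1 : (((m : Int) + 1) - 1).toNat = m := by omega
    have hi2 : ((m : Int) + 1).toNat = m + 1 := by omega
    rw [hi1, s1inner_eq R _ (R.toNat + 1) (by omega) _ _ (by simp only [F1, List.length_cons, List.length_map, List.length_range]; omega), hi2]
    have hpow : (2:Nat) ^ (m+1) = 2^m + 2^m := by rw [pow_succ]; omega
    by_cases hc : R.toNat ≤ 2 ^ m
    · have h1 : min (2 ^ m) R.toNat = R.toNat := by omega
      have h2 : min (2 ^ (m+1)) R.toNat = R.toNat := by omega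
      rw [h1, h2]
      simp [F1]
    · have h1 : min (2 ^ m) R.toNat = 2 ^ m := by omega
      rw [h1]
      set c := min (2 ^ m) (R.toNat + 1 - ((F1 (2^m)).length)) with hcdef
      have hlen : (F1 (2^m)).length = 2^m + 1 := by simp [F1]
      have hc2 : c = min (2 ^ m) (R.toNat - 2^m) := by rw [hcdef, hlen]; omega
      have h2 : min (2 ^ (m+1)) R.toNat = 2^m + c := by omega
      rw [h2]
      show F1 (2^m) ++ _ = _
      rw [F1, F1, map_range_append val1 (2^m) c (some ((2:Int) ^ (m+1)))
        (by
          intro j hj1 hj2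
          rw [val1, bitLength_unique j (m+1) (by simpa using hj1) (by omega) (by omega)])]
      simp

theorem slice1_eq (L R : Int) (hL : 1 ≤ L) (hLR : L ≤ R) :
    PySem.List.slice (F1 R.toNat) (some L) (some (R + 1))
    = (PySem.List.pyRange L (R + 1) 1).map
        (fun k => some ((2 : Int) ^ PySem.Int.bitLength (k - 1))) := by
  rw [PySem.List.slice_toNat _ (by omega) (by omega)]
  apply List.ext_getElem
  · simp [F1, PySem.List.length_pyRange_one]
    omega
  · intro t h1 h2
    simp only [List.getElem_take, List.getElem_drop, List.getElem_map,
      PySem.List.getElem_pyRange_one]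
    simp only [F1, List.getElem_cons]
    rw [dif_neg (by omega)]
    simp only [List.getElem_map, List.getElem_range, val1]
    have : ((L.toNat + t - 1 : Nat) : Int) = L + (t : Int) - 1 := by omega
    rw [this]

theorem slice2_eq (L R X : Int) (hL : 1 ≤ L) (hLR : L ≤ R) :
    PySem.List.slice (F2 X R.toNat) (some (L - 1)) none
    = (PySem.List.pyRange L (R + 1) 1).map
        (fun k => X * PySem.Int.floordiv (k + X - 1) X) := by
  rw [PySem.List.slice_from _ (by omega)]
  apply List.ext_getElem
  · simp [F2, PySem.List.length_pyRange_one]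
    omega
  · intro t h1 h2
    simp only [List.getElem_drop, PySem.List.getElem_pyRange_one, List.getElem_map]
    simp only [F2]; rw [List.getElem_map, List.getElem_range, val2]
    congr 1
    have : (((L-1).toNat + t : Nat) : Int) = L - 1 + (t : Int) := by omega
    rw [this]
    congr 1
    omega

theorem loops_eq (L R X : Int)
    (f1 : Int → Option Int) (f2 : Int → Int)
    (hf1 : f1 = fun k => some ((2 : Int) ^ PySem.Int.bitLength (k - 1)))
    (hf2 : f2 = fun k => X * PySem.Int.floordiv (k + X - 1) X) :
    ∀ (n : Nat), (n : Int) ≤ R + 1 - L → ∀ (c : Int × Int),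
    (PySem.List.pyRange 0 (n : Int) 1).foldl
      (fun (c : Int × Int) i =>
        match PySem.List.pyGet? ((PySem.List.pyRange L (R+1) 1).map f1) i,
              PySem.List.pyGet? ((PySem.List.pyRange L (R+1) 1).map f2) i with
        | some (some a), some b =>
            if a < b then (c.1 + 1, c.2) else if b < a then (c.1, c.2 + 1) else c
        | _, _ => c) c
    = (PySem.List.pyRange L (L + (n : Int)) 1).foldl
      (fun (c : Int × Int) k =>
        let v1 : Int := 2 ^ PySem.Int.bitLength (k - 1)
        let v2 : Int := X * PySem.Int.floordiv (k + X - 1) X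
        if v1 < v2 then (c.1 + 1, c.2) else if v2 < v1 then (c.1, c.2 + 1) else c) c := by
  intro n
  induction n with
  | zero => intro _ c; simp
  | succ n ih =>
    intro hn c
    have e1 : ((n + 1 : Nat) : Int) = (n : Int) + 1 := by push_cast; ring
    have e2 : L + ((n + 1 : Nat) : Int) = (L + (n : Int)) + 1 := by push_cast; ring
    set W := PySem.List.pyRange L (R+1) 1 with hW
    rw [e1, PySem.List.pyRange_one_succ_right (by omega : (0:Int) ≤ (n:Int)),
        show L + ((n:Int) + 1) = (L + (n:Int)) + 1 from by ring,
        PySem.List.pyRange_one_succ_right (by omega : L ≤ L + (n:Int)),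
        List.foldl_append, List.foldl_append, ih (by omega)]
    simp only [List.foldl_cons, List.foldl_nil]
    set c' := (PySem.List.pyRange L (L + (n:Int)) 1).foldl _ c with hc'
    have hlen : n < ((PySem.List.pyRange L (R+1) 1)).length := by
      rw [PySem.List.length_pyRange_one]; omega
    have hget : ∀ {α : Type} (f : Int → α),
        PySem.List.pyGet? ((PySem.List.pyRange L (R+1) 1).map f) (n : Int) = some (f (L + (n:Int))) := by
      intro α f
      rw [PySem.List.pyGet?_natCast]
      rw [List.getElem?_map, List.getElem?_eq_getElem (by simpa using hlen)]
      simp [PySem.List.getElem_pyRange_one]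
    rw [hget f1, hget f2, hf1, hf2]

theorem sensor1_closed (L R : Int) (hL : 1 ≤ L) (hLR : L ≤ R) :
    sensor1 L R = (PySem.List.pyRange L (R + 1) 1).map
      (fun k => some ((2 : Int) ^ PySem.Int.bitLength (k - 1))) := by
  have hR : 1 ≤ R := le_trans hL hLR
  have hcast : R + 1 = (R.toNat : Int) + 1 := by omega
  rw [sensor1]
  simp only [hcast, sensor1_loop R hR R.toNat]
  have : min (2 ^ R.toNat) R.toNat = R.toNat := by
    have := Nat.lt_two_pow_self (n := R.toNat)
    omega
  rw [this, ← hcast, slice1_eq L R hL hLR]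

theorem sensor2_closed (L R X : Int) (hL : 1 ≤ L) (hLR : L ≤ R) (hX : 1 ≤ X) :
    sensor2 L R X = (PySem.List.pyRange L (R + 1) 1).map
      (fun k => X * PySem.Int.floordiv (k + X - 1) X) := by
  have hR : 1 ≤ R := le_trans hL hLR
  have hcast : R + 1 = (R.toNat : Int) + 1 := by omega
  rw [sensor2]
  simp only [hcast, sensor2_loop R X hR hX R.toNat]
  have : min (X.toNat * R.toNat) R.toNat = R.toNat := by
    have : R.toNat ≤ X.toNat * R.toNat := Nat.le_mul_of_pos_left _ (by omega)
    omega
  rw [this, ← hcast, slice2_eq L R X hL hLR]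

theorem solve_eq (L R X : Int) (h : L ≤ R → (1 ≤ L ∧ 1 ≤ X)) : solve L R X = solve_alt L R X := by
  by_cases hLR : L ≤ R
  · obtain ⟨hL, hX⟩ := h hLR
    rw [solve, solve_alt]
    simp only [sensor1_closed L R hL hLR, sensor2_closed L R X hL hLR hX]
    have hn : R - L + 1 = (((R + 1 - L).toNat : Nat) : Int) := by omega
    have hend : R + 1 = L + (((R + 1 - L).toNat : Nat) : Int) := by omega
    rw [hn]
    conv_rhs => rw [hend]
    rw [loops_eq L R X _ _ rfl rfl (R + 1 - L).toNat (by omega) (0, 0)]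
  · rw [solve, solve_alt]
    rw [PySem.List.pyRange_one_eq_nil (show R - L + 1 ≤ 0 by omega),
        PySem.List.pyRange_one_eq_nil (show R + 1 ≤ L by omega)]
    norm_num

-- ===== VERDICT (by name: the statement is the Claim_ definition above) =====
theorem solve_spec : Claim_equal_solve := by
  intro L R X _ hpre
  unfold Spec_solve
  exact solve_eq L R X hpre
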